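-- pv_equiv track=rewrite | github.com/Nithish9345/Topper_problem | topper_problem.py | topper_num
-- ===== SOURCE A (Python) =====
-- def topper_num(n):
--     a, b, flag = 0, 0, 0
--     while(n!=0):
--         s = n%10
--         if(flag == 0):
--             a += s
--             flag = 1
--         else:
--             b+=s
--             flag = 0
--         n=n//10
--
--     return a==b
-- ===== SOURCE B (Python) =====
-- def topper_num(n):
--     diff = sum(int(d) if i % 2 == 0 else -int(d) for i, d in enumerate(str(n)))
--     return diff == 0
-- ===== Notes on version B (the rewrite author's own statement) =====
-- stated objective: idiomatic
-- what changed: B renders n as its decimal string and computes one signed sum over enumerate(str(n)) (positive digits at even indices, negative at odd) instead of A's modulo/floor-div digit extraction with a toggling flag and two accumulators; the two alternating sums are equal exactly when the signed sum vanishes, unaffected by the MSB-vs-LSB traversal order. Pre_ excludes negative n, on which A's while loop never terminates.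
import Mathlib
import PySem

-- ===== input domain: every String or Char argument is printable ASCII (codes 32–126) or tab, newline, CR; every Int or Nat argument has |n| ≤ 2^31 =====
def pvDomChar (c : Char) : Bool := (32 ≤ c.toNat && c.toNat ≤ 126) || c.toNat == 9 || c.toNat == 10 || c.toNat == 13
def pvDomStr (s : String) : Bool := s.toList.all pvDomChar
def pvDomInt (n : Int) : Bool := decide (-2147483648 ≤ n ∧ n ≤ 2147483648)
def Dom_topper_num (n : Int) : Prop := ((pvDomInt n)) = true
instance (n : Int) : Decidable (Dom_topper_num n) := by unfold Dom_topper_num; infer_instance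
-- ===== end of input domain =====

-- B computes one signed sum over enumerate(str(n)) instead of A's modulo/floor-div loop
-- with a toggling flag and two accumulators (objective: idiomatic; same cost).


-- ===== PORT A =====
-- termination fact for the while loop (cited by decreasing_by)
theorem pvFloordiv10_toNat_lt (n : Int) (h : 0 < n) :
    (PySem.Int.floordiv n 10).toNat < n.toNat := by
  have hlt : n.toNat / 10 < n.toNat := Nat.div_lt_self (by omega) (by omega)
  have heq : PySem.Int.floordiv n 10 = ((n.toNat / 10 : Nat) : Int) := by
    conv_lhs => rw [show n = ((n.toNat : Nat) : Int) by omega,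
                    show ((10 : Int)) = ((10 : Nat) : Int) from rfl]
    rw [PySem.Int.floordiv_natCast]
  rw [heq]; omega

-- the while loop of A; the guard '0 < n' (vs Python's 'n != 0') is a totality guard:
-- for n < 0 Python's loop never terminates, and Pre_ excludes those inputs.
def topperLoop (a b flag n : Int) : Bool :=
  if h : 0 < n then
    let s := PySem.Int.mod n 10
    if flag = 0 then
      topperLoop (a + s) b 1 (PySem.Int.floordiv n 10)
    else
      topperLoop a (b + s) 0 (PySem.Int.floordiv n 10)
  else
    a == b
termination_by n.toNat
decreasing_by all_goals exact pvFloordiv10_toNat_lt n h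

def topper_num (n : Int) : Bool := topperLoop 0 0 0 n

-- ===== PORT B =====
def topper_num_alt (n : Int) : Bool :=
  let s := (PySem.Int.toStr n).toList
  let diff := ((PySem.List.enumerate s).map
    (fun p => if PySem.Int.mod p.1 2 = 0 then (PySem.Int.ofChars? [p.2]).getD 0
              else -((PySem.Int.ofChars? [p.2]).getD 0))).sum
  diff == 0

-- ===== PRECONDITION & SPEC =====
-- Pre_ excludes n < 0: there Python A's 'while n != 0' never terminates (n // 10 converges to a fixed negative point),
-- so A returns on exactly the non-negative inputs.
def Pre_topper_num (n : Int) : Prop := 0 ≤ n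
instance (n : Int) : Decidable (Pre_topper_num n) := by unfold Pre_topper_num; infer_instance

def pvWitness_topper_num : Int := (121)

def Spec_topper_num (n : Int) (out : Bool) : Prop := out = topper_num_alt n
instance (n : Int) (out : Bool) : Decidable (Spec_topper_num n out) := by unfold Spec_topper_num; infer_instance

-- ===== CLAIM (what is proved, stated in full; the proofs are below) =====
def Claim_equal_topper_num : Prop := ∀ (n : Int), Dom_topper_num n → Pre_topper_num n → Spec_topper_num n (topper_num n)

-- ===== LEMMAS AND PROOFS =====

theorem pvBeq_eq_decide (a b : Int) : (a == b) = decide (a = b) := by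
  by_cases h : a = b <;> simp [h]

-- alternating sum of A's digit stream (least significant digit first, positive first)
def pvW (m : Nat) : Int :=
  if m = 0 then 0 else ((m % 10 : Nat) : Int) - pvW (m / 10)
decreasing_by exact Nat.div_lt_self (by omega) (by omega)

-- alternating sum of a list, first element positive
def pvT : List Int → Int
  | [] => 0
  | x :: xs => x - pvT xs

-- least-significant-first digit list (0 ↦ [0])
def pvLsd (m : Nat) : List Int :=
  if m < 10 then [(m : Int)] else ((m % 10 : Nat) : Int) :: pvLsd (m / 10)
decreasing_by exact Nat.div_lt_self (by omega) (by omega)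

-- most-significant-first decimal character list, as Nat.toDigits produces it
def pvMsdC (m : Nat) : List Char :=
  if m < 10 then [Nat.digitChar m] else pvMsdC (m / 10) ++ [Nat.digitChar (m % 10)]
decreasing_by exact Nat.div_lt_self (by omega) (by omega)

theorem pvToDigitsCore_eq (f : Nat) : ∀ (n : Nat) (acc : List Char), n < 10 ^ (f + 1) →
    Nat.toDigitsCore 10 (f + 1) n acc = pvMsdC n ++ acc := by
  induction f with
  | zero =>
    intro n acc h
    have h10 : n < 10 := by simpa using h
    have : n / 10 = 0 := Nat.div_eq_of_lt h10
    simp [Nat.toDigitsCore, this, pvMsdC, h10, Nat.mod_eq_of_lt h10]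
  | succ f ih =>
    intro n acc h
    by_cases h10 : n < 10
    · have : n / 10 = 0 := Nat.div_eq_of_lt h10
      simp [Nat.toDigitsCore, this, pvMsdC, h10, Nat.mod_eq_of_lt h10]
    · have hdiv : n / 10 ≠ 0 := by
        intro hc
        exact h10 (by omega)
      have hlt : n / 10 < 10 ^ (f + 1) := by
        have h10pow : 10 ^ (f + 1 + 1) = 10 ^ (f + 1) * 10 := by ring
        exact Nat.div_lt_of_lt_mul (by omega)
      rw [show Nat.toDigitsCore 10 (f + 1 + 1) n acc
            = Nat.toDigitsCore 10 (f + 1) (n / 10) (Nat.digitChar (n % 10) :: acc) by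
          simp [Nat.toDigitsCore, hdiv]]
      rw [ih (n / 10) _ hlt]
      conv_rhs => rw [pvMsdC]
      simp [h10]

theorem pvToDigits_eq (m : Nat) : Nat.toDigits 10 m = pvMsdC m := by
  have h : m < 10 ^ (m + 1) := by
    calc m < 10 ^ m := Nat.lt_pow_self (by omega)
    _ ≤ 10 ^ (m + 1) := Nat.pow_le_pow_right (by omega) (by omega)
  show Nat.toDigitsCore 10 (m + 1) m [] = pvMsdC m
  rw [pvToDigitsCore_eq m m [] h, List.append_nil]

theorem pvCharVal (k : Nat) (h : k < 10) :
    (PySem.Int.ofChars? [Nat.digitChar k]).getD 0 = (k : Int) := by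
  interval_cases k <;> decide

theorem pvMap_msdC (m : Nat) :
    (pvMsdC m).map (fun c => (PySem.Int.ofChars? [c]).getD 0) = (pvLsd m).reverse := by
  induction m using Nat.strong_induction_on with
  | _ m ih =>
    by_cases h10 : m < 10
    · rw [pvMsdC, pvLsd]
      simp [h10, pvCharVal m h10]
    · rw [pvMsdC, pvLsd]
      simp only [h10, if_false, List.map_append, List.map_cons, List.map_nil,
        List.reverse_cons]
      rw [ih (m / 10) (Nat.div_lt_self (by omega) (by omega)),
        pvCharVal (m % 10) (Nat.mod_lt m (by omega))]

theorem pvT_lsd (m : Nat) : pvT (pvLsd m) = pvW m := by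
  induction m using Nat.strong_induction_on with
  | _ m ih =>
    by_cases h10 : m < 10
    · rw [pvLsd, if_pos h10]
      by_cases h0 : m = 0
      · simp [h0, pvT, pvW]
      · rw [pvW, if_neg h0, pvW, if_pos (Nat.div_eq_of_lt h10), Nat.mod_eq_of_lt h10]
        simp [pvT]
    · rw [pvLsd, if_neg h10, pvW, if_neg (by omega : ¬ m = 0)]
      simp only [pvT]
      rw [ih (m / 10) (Nat.div_lt_self (by omega) (by omega))]

theorem pvT_append (ys : List Int) (x : Int) :
    pvT (ys ++ [x]) = pvT ys + (if ys.length % 2 = 0 then x else -x) := by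
  induction ys with
  | nil => simp [pvT]
  | cons y ys ih =>
    simp only [List.cons_append, pvT, ih, List.length_cons]
    rcases Nat.even_or_odd ys.length with h | h
    · have h0 : ys.length % 2 = 0 := Nat.even_iff.mp h
      have h1 : (ys.length + 1) % 2 = 1 := by omega
      simp [h0, h1]; ring
    · have h0 : ys.length % 2 = 1 := Nat.odd_iff.mp h
      have h1 : (ys.length + 1) % 2 = 0 := by omega
      simp [h0, h1]; ring

theorem pvT_reverse (L : List Int) :
    pvT L.reverse = if L.length % 2 = 1 then pvT L else -pvT L := by
  induction L with
  | nil => simp [pvT]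
  | cons x xs ih =>
    rw [List.reverse_cons, pvT_append, ih]
    simp only [List.length_reverse, List.length_cons, pvT]
    rcases Nat.even_or_odd xs.length with h | h
    · have h0 : xs.length % 2 = 0 := Nat.even_iff.mp h
      have h1 : (xs.length + 1) % 2 = 1 := by omega
      simp [h0, h1]; ring
    · have h0 : xs.length % 2 = 1 := Nat.odd_iff.mp h
      have h1 : (xs.length + 1) % 2 = 0 := by omega
      simp [h0, h1]; ring

theorem pvEnumSum (cs : List Char) : ∀ (k : Int), 0 ≤ k →
    ((PySem.List.enumerate cs k).map
      (fun p => if PySem.Int.mod p.1 2 = 0 then (PySem.Int.ofChars? [p.2]).getD 0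
                else -((PySem.Int.ofChars? [p.2]).getD 0))).sum
    = if PySem.Int.mod k 2 = 0
        then pvT (cs.map (fun c => (PySem.Int.ofChars? [c]).getD 0))
        else -pvT (cs.map (fun c => (PySem.Int.ofChars? [c]).getD 0)) := by
  induction cs with
  | nil =>
    intro k hk
    simp [PySem.List.enumerate_nil, pvT]
  | cons c cs ih =>
    intro k hk
    rw [PySem.List.enumerate_cons, List.map_cons, List.sum_cons, ih (k + 1) (by omega)]
    simp only [PySem.Int.mod_eq_emod_of_pos (by norm_num : (0 : Int) < 2)]
    rcases Int.emod_two_eq k with h | h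
    · have h1 : (k + 1) % 2 = 1 := by omega
      simp [h, h1, pvT]
      ring
    · have h1 : (k + 1) % 2 = 0 := by omega
      simp [h, h1, pvT]
      ring

theorem pvLoopSpec (m : Nat) : ∀ (a b : Int),
    (topperLoop a b 0 (m : Int) = decide (a - b + pvW m = 0)) ∧
    (topperLoop a b 1 (m : Int) = decide (a - b - pvW m = 0)) := by
  induction m using Nat.strong_induction_on with
  | _ m ih =>
    intro a b
    by_cases h0 : m = 0
    · subst h0
      have hW0 : pvW 0 = 0 := by rw [pvW]; simp
      have hstop : ∀ f : Int, topperLoop a b f ((0 : Nat) : Int) = (a == b) := by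
        intro f; rw [topperLoop]; norm_num
      constructor <;>
        · rw [hstop, pvBeq_eq_decide, decide_eq_decide, hW0]
          omega
    · have hpos : 0 < ((m : Nat) : Int) := by omega
      have hmod : PySem.Int.mod (m : Int) 10 = ((m % 10 : Nat) : Int) := by
        rw [show ((10 : Int)) = ((10 : Nat) : Int) from rfl, PySem.Int.mod_natCast]
      have hdiv : PySem.Int.floordiv (m : Int) 10 = ((m / 10 : Nat) : Int) := by
        rw [show ((10 : Int)) = ((10 : Nat) : Int) from rfl, PySem.Int.floordiv_natCast]
      have ihd := ih (m / 10) (Nat.div_lt_self (by omega) (by omega))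
      have hW : pvW m = ((m % 10 : Nat) : Int) - pvW (m / 10) := by
        rw [pvW, if_neg h0]
      constructor
      · rw [topperLoop, dif_pos hpos]
        dsimp only
        rw [if_pos rfl, hmod, hdiv, (ihd (a + ((m % 10 : Nat) : Int)) b).2, hW,
          decide_eq_decide]
        omega
      · rw [topperLoop, dif_pos hpos]
        dsimp only
        rw [if_neg (by norm_num : ¬ ((1 : Int) = 0)), hmod, hdiv,
          (ihd a (b + ((m % 10 : Nat) : Int))).1, hW, decide_eq_decide]
        omega

-- ===== VERDICT (by name: the statement is the Claim_ definition above) =====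
theorem topper_num_spec : Claim_equal_topper_num := by
  intro n hdom hpre
  unfold Spec_topper_num
  unfold Pre_topper_num at hpre
  have hn : n = ((n.toNat : Nat) : Int) := by omega
  rw [hn]
  generalize n.toNat = m
  -- A side
  have hA : topper_num ((m : Nat) : Int) = decide (pvW m = 0) := by
    unfold topper_num
    rw [(pvLoopSpec m 0 0).1]
    norm_num
  -- B side
  have hChars : (PySem.Int.toStr ((m : Nat) : Int)).toList = pvMsdC m := by
    rw [PySem.Int.toList_toStr]
    simp only [PySem.Int.toChars, if_neg (by omega : ¬ ((m : Nat) : Int) < 0),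
      Int.toNat_natCast]
    exact pvToDigits_eq m
  have hB : topper_num_alt ((m : Nat) : Int)
      = ((pvT ((pvLsd m).reverse)) == 0) := by
    unfold topper_num_alt
    dsimp only
    rw [hChars, pvEnumSum (pvMsdC m) 0 (by omega), pvMap_msdC m]
    rw [if_pos (by decide)]
  rw [hA, hB, pvT_reverse, pvT_lsd]
  by_cases hw : pvW m = 0
  · split <;> simp [hw]
  · split <;> simp [hw]
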